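-- pv_equiv track=rewrite | github.com/qiupeizhao/fristGit | COSC_262_Assignment/test.py | find_special_point
-- ===== SOURCE A (Python) =====
-- def find_special_point(input_coordinate):
--         max_x_index = 0
--         min_x_index = 0
--         max_y_index = 0
--         min_y_index = 0
--         for index in range(1,len(input_coordinate)):
--
--                 if input_coordinate[index][0] > input_coordinate[max_x_index][0]:
--                         max_x_index = index
--                 if input_coordinate[index][0] < input_coordinate[min_x_index][0]:
--                         min_x_index = index
--                 if input_coordinate[index][1] > input_coordinate[max_y_index][1]:
--                         max_y_index = index
--                 if input_coordinate[index][1] < input_coordinate[min_y_index][1]: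
--                         min_y_index = index
--
--
--         return max_x_index,min_x_index,max_y_index,min_y_index
-- ===== SOURCE B (Python) =====
-- def find_special_point(input_coordinate):
--     if not input_coordinate:
--         return 0, 0, 0, 0
--     idx = range(len(input_coordinate))
--     return (max(idx, key=lambda i: input_coordinate[i][0]),
--             min(idx, key=lambda i: input_coordinate[i][0]),
--             max(idx, key=lambda i: input_coordinate[i][1]),
--             min(idx, key=lambda i: input_coordinate[i][1]))
-- ===== Notes on version B (the rewrite author's own statement) =====
-- stated objective: idiomatic
-- what changed: Replaces the fused index loop maintaining four counters with four independent built-in max/min reductions over the index range (first-extremal semantics match A's strict comparisons), plus an explicit empty-list guard.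
import Mathlib
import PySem

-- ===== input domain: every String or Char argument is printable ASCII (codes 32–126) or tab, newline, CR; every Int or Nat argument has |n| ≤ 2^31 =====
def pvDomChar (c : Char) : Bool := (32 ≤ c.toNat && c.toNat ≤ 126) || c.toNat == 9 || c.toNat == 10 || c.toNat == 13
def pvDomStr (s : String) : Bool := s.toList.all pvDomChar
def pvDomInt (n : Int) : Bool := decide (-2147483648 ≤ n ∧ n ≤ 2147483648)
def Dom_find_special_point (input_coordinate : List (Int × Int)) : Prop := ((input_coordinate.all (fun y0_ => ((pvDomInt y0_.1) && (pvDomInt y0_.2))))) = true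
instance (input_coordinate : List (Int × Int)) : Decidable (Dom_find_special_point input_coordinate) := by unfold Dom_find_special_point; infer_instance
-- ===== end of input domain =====

-- ===== PORT A =====
-- A: one fused loop over indices 1..len-1 maintaining four extremal indices (strict comparisons keep the earliest index).
def find_special_point (input_coordinate : List (Int × Int)) : Int × Int × Int × Int :=
  (PySem.List.pyRange 1 (input_coordinate.length) 1).foldl
    -- the four ifs are written as a simultaneous tuple update: each branch in A reads
    -- only the component it updates, so the sequential ifs are exactly this.
    (fun (s : Int × Int × Int × Int) index =>
      let gx := fun i => ((PySem.List.pyGet? input_coordinate i).getD (0, 0)).1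
      let gy := fun i => ((PySem.List.pyGet? input_coordinate i).getD (0, 0)).2
      (if gx index > gx s.1 then index else s.1,
       if gx index < gx s.2.1 then index else s.2.1,
       if gy index > gy s.2.2.1 then index else s.2.2.1,
       if gy index < gy s.2.2.2 then index else s.2.2.2))
    (0, 0, 0, 0)

-- ===== PORT B =====
-- B (idiomatic): four independent first-extremal reductions over the index range, with an empty-list guard.
-- pyArgBest k cmp = Python's max/min over range(len c) with key k and comparison cmp (first extremal index).
def pyArgBest (n : Int) (k : Int → Int) (cmp : Int → Int → Prop) [DecidableRel cmp] : Int :=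
  (PySem.List.pyRange 1 n 1).foldl (fun best i => if cmp (k i) (k best) then i else best) 0

def find_special_point_alt (input_coordinate : List (Int × Int)) : Int × Int × Int × Int :=
  if input_coordinate = [] then (0, 0, 0, 0)
  else
    let kx := fun i => ((PySem.List.pyGet? input_coordinate i).getD (0, 0)).1
    let ky := fun i => ((PySem.List.pyGet? input_coordinate i).getD (0, 0)).2
    let n := (input_coordinate.length : Int)
    (pyArgBest n kx (· > ·),
     pyArgBest n kx (· < ·),
     pyArgBest n ky (· > ·),
     pyArgBest n ky (· < ·))

-- ===== PRECONDITION & SPEC =====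
def Spec_find_special_point (input_coordinate : List (Int × Int)) (out : Int × Int × Int × Int) : Prop := out = find_special_point_alt input_coordinate
instance (input_coordinate : List (Int × Int)) (out : Int × Int × Int × Int) : Decidable (Spec_find_special_point input_coordinate out) := by unfold Spec_find_special_point; infer_instance

-- ===== CLAIM (what is proved, stated in full; the proofs are below) =====
def Claim_equal_find_special_point : Prop := ∀ (input_coordinate : List (Int × Int)), Dom_find_special_point input_coordinate → Spec_find_special_point input_coordinate (find_special_point input_coordinate)

-- ===== LEMMAS AND PROOFS =====

-- The fused four-counter fold equals the tuple of the four independent folds, for any index list and any keys.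
theorem fold4_split (kx ky : Int → Int) (l : List Int) (a b c d : Int) :
    l.foldl
      (fun (s : Int × Int × Int × Int) index =>
        (if kx index > kx s.1 then index else s.1,
         if kx index < kx s.2.1 then index else s.2.1,
         if ky index > ky s.2.2.1 then index else s.2.2.1,
         if ky index < ky s.2.2.2 then index else s.2.2.2))
      (a, b, c, d)
    = (l.foldl (fun best i => if kx i > kx best then i else best) a,
       l.foldl (fun best i => if kx i < kx best then i else best) b,
       l.foldl (fun best i => if ky i > ky best then i else best) c,
       l.foldl (fun best i => if ky i < ky best then i else best) d) := by
  induction l generalizing a b c d with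
  | nil => rfl
  | cons x xs ih =>
      simp only [List.foldl]
      exact ih ..

-- ===== VERDICT (by name: the statement is the Claim_ definition above) =====
theorem find_special_point_spec : Claim_equal_find_special_point := by
  intro c _
  show find_special_point c = find_special_point_alt c
  by_cases h : c = []
  · subst h; decide
  · simp only [find_special_point, find_special_point_alt, pyArgBest, if_neg h]
    exact fold4_split _ _ _ _ _ _ _
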